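-- pv_equiv track=rewrite | github.com/NunoDiogoGoncalves/staff-scheduling | src/io_utils.py | derive_shift_availability_from_grid
-- ===== SOURCE A (Python) =====
-- from collections import defaultdict
--
-- def derive_shift_availability_from_grid(shifts, covers, employees, days, blocked):
--     """
--     Build a sparse dict {(i,j,d):1} iff employee i is available on all covered t of shift j on day d.
--     covers is sparse {(j,t):1}.
--     This applies just for FT.
--     """
--     by_shift_t = defaultdict(list)
--     for (j, t), _ in covers.items():
--         by_shift_t[j].append(t)
--
--     avail_shift = {}
--     for i in employees:
--         for j in shifts:
--             ts = by_shift_t.get(j, [])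
--             if not ts:   # shift with no coverage slots? then trivially available
--                 for d in days:
--                     avail_shift[(i, j, d)] = 1
--                 continue
--             for d in days:
--                 ok = True
--                 for t in ts:
--                     if (i, d, t) in blocked:  # if blocked, then not available
--                         ok = False
--                         break
--                 if ok:
--                     avail_shift[(i, j, d)] = 1
--     return avail_shift
-- ===== SOURCE B (Python) =====
-- def derive_shift_availability_from_grid(shifts, covers, employees, days, blocked):
--     """
--     Same result as A: dict {(i,j,d):1} iff employee i is free on every covered
--     slot t of shift j on day d. Strategy: duplicates in the three lists only
--     re-insert an existing key, so iterate each list's distinct values once,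
--     mark ALL those triples available in one comprehension, then use a
--     precomputed slot->shifts index to delete exactly the triples that a blocked
--     (i,d,t) invalidates; dict deletion keeps insertion order, so the dict is
--     identical to A's.
--     """
--     shifts_by_slot = {}
--     for (j, t) in covers:
--         shifts_by_slot.setdefault(t, []).append(j)
--
--     es = list(dict.fromkeys(employees))
--     ss = list(dict.fromkeys(shifts))
--     ds = list(dict.fromkeys(days))
--     avail_shift = {(i, j, d): 1 for i in es for j in ss for d in ds}
--
--     pop = avail_shift.pop
--     for (i, d, t) in blocked:
--         for j in shifts_by_slot.get(t, ()):
--             pop((i, j, d), None)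
--     return avail_shift
-- ===== Notes on version B (the rewrite author's own statement) =====
-- stated objective: alternative
-- what changed: Instead of testing every covered slot of every (employee, shift, day) triple, B iterates only the distinct values of the three lists, marks all those triples available in one comprehension, and then deletes exactly the triples invalidated by each blocked (i,d,t) via a precomputed slot->shifts index (dict deletion preserves insertion order); it avoids A's inner slot scan and all duplicate work, but the bulk dict build dominates both, so measured times are workload-dependent.
import Mathlib
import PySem

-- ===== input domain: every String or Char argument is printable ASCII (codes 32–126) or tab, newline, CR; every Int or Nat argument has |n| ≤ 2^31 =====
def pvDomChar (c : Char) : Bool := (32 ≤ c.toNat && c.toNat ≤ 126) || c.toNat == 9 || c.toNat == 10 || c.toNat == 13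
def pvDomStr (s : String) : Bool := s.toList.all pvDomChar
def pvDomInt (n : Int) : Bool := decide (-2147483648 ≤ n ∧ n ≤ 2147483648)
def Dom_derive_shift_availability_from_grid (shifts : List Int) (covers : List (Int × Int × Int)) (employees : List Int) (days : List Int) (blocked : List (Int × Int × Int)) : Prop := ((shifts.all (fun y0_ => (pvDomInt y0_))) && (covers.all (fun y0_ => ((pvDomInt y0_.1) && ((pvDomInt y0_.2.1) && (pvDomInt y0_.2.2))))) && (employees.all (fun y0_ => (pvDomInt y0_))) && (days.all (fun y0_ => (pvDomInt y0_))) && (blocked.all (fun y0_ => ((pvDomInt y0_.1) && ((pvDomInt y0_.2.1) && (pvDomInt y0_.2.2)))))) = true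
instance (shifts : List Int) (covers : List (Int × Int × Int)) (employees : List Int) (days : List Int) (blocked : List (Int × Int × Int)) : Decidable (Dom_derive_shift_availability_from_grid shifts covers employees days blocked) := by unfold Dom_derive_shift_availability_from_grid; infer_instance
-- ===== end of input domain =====

-- ===== PORT A =====
-- B replaces A's per-triple scan over each shift's covered slots by "mark all triples of the
-- DISTINCT list values available, then delete the triples hit by each blocked slot via a
-- slot->shifts index" (same dict, same insertion order); objective: alternative algorithm.

-- by_shift_t: shift j -> list of its covered slots t (defaultdict(list) append loop)
def pvByShift (covers : List (Int × Int × Int)) : PySem.Dict Int (List Int) :=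
  covers.foldl (fun dct p => dct.modify p.1 [] (fun l => l ++ [p.2.1])) PySem.Dict.empty

-- the inner 'for t in ts: if (i,d,t) in blocked: ok=False; break' loop (short-circuit all)
def pvCheckOk (blocked : List (Int × Int × Int)) (i d : Int) (ts : List Int) : Bool :=
  ts.all (fun t => !(blocked.contains (i, d, t)))

def derive_shift_availability_from_grid (shifts : List Int) (covers : List (Int × Int × Int)) (employees : List Int) (days : List Int) (blocked : List (Int × Int × Int)) : List (Int × Int × Int × Int) :=
  -- avail_shift, built exactly as A's nested loops do
  (employees.foldl (fun acc i =>
      shifts.foldl (fun acc j =>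
        let ts := (pvByShift covers).getD j []
        if ts.isEmpty then
          days.foldl (fun acc d => acc.insert (i, j, d) 1) acc
        else
          days.foldl (fun acc d =>
            if pvCheckOk blocked i d ts then acc.insert (i, j, d) 1 else acc) acc) acc)
    PySem.Dict.empty).items.map (fun p => (p.1.1, p.1.2.1, p.1.2.2, p.2))

-- ===== PORT B =====
-- B iterates the distinct values of the three lists (es/ss/ds in Source B), marks every triple
-- available, then deletes the triples each blocked slot invalidates via a slot->shifts index.
-- shifts_by_slot: slot t -> list of shifts j covering it
def pvByT (covers : List (Int × Int × Int)) : PySem.Dict Int (List Int) :=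
  covers.foldl (fun dct p => dct.modify p.2.1 [] (fun l => l ++ [p.1])) PySem.Dict.empty

-- the comprehension {(i,j,d): 1 for i in .. for j in .. for d in ..}
def pvAllAvail (shifts : List Int) (employees : List Int) (days : List Int) : PySem.Dict (Int × Int × Int) Int :=
  employees.foldl (fun acc i =>
    shifts.foldl (fun acc j =>
      days.foldl (fun acc d => acc.insert (i, j, d) 1) acc) acc) PySem.Dict.empty

def derive_shift_availability_from_grid_alt (shifts : List Int) (covers : List (Int × Int × Int)) (employees : List Int) (days : List Int) (blocked : List (Int × Int × Int)) : List (Int × Int × Int × Int) :=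
  (blocked.foldl (fun acc q =>
      ((pvByT covers).getD q.2.2 []).foldl (fun acc j => acc.erase (q.1, j, q.2.1)) acc)
      (pvAllAvail (PySem.List.dedup shifts) (PySem.List.dedup employees) (PySem.List.dedup days))).items.map
    (fun p => (p.1.1, p.1.2.1, p.1.2.2, p.2))

-- ===== PRECONDITION & SPEC =====
def Spec_derive_shift_availability_from_grid (shifts : List Int) (covers : List (Int × Int × Int)) (employees : List Int) (days : List Int) (blocked : List (Int × Int × Int)) (out : List (Int × Int × Int × Int)) : Prop := out = derive_shift_availability_from_grid_alt shifts covers employees days blocked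
instance (shifts : List Int) (covers : List (Int × Int × Int)) (employees : List Int) (days : List Int) (blocked : List (Int × Int × Int)) (out : List (Int × Int × Int × Int)) : Decidable (Spec_derive_shift_availability_from_grid shifts covers employees days blocked out) := by unfold Spec_derive_shift_availability_from_grid; infer_instance

-- ===== CLAIM (what is proved, stated in full; the proofs are below) =====
def Claim_equal_derive_shift_availability_from_grid : Prop := ∀ (shifts : List Int) (covers : List (Int × Int × Int)) (employees : List Int) (days : List Int) (blocked : List (Int × Int × Int)), Dom_derive_shift_availability_from_grid shifts covers employees days blocked → Spec_derive_shift_availability_from_grid shifts covers employees days blocked (derive_shift_availability_from_grid shifts covers employees days blocked)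

-- ===== LEMMAS AND PROOFS =====

-- the sub-dict of d whose keys satisfy P (proof device; no Python counterpart)
def pvFilterD {κ ν : Type} [BEq κ] (P : κ → Bool) (d : PySem.Dict κ ν) : PySem.Dict κ ν :=
  ⟨d.items.filter (fun p => P p.1)⟩

-- availability of the triple k, as A decides it
def pvPred (covers blocked : List (Int × Int × Int)) (k : Int × Int × Int) : Bool :=
  pvCheckOk blocked k.1 k.2.2 ((pvByShift covers).getD k.2.1 [])

theorem pvFoldl_rel {κ ν γ : Type} [BEq κ] (P : κ → Bool)
    (F G : PySem.Dict κ ν → γ → PySem.Dict κ ν)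
    (h : ∀ e x, F (pvFilterD P e) x = pvFilterD P (G e x)) (l : List γ) :
    ∀ e, l.foldl F (pvFilterD P e) = pvFilterD P (l.foldl G e) := by
  induction l with
  | nil => intro e; rfl
  | cons x t ih => intro e; simp only [List.foldl_cons, h e x]; exact ih (G e x)

theorem pvFoldl_flatMap {α β γ : Type} (g : γ → List α) (f : β → α → β) (xs : List γ) :
    ∀ init : β, (xs.flatMap g).foldl f init = xs.foldl (fun acc c => (g c).foldl f acc) init := by
  induction xs with
  | nil => intro init; rfl
  | cons x t ih => intro init; simp [List.foldl_append, ih]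

theorem pvFilterD_contains_false {κ ν : Type} [BEq κ] (P : κ → Bool) (d : PySem.Dict κ ν) (k : κ)
    (h : d.contains k = false) : (pvFilterD P d).contains k = false := by
  simp only [pvFilterD, PySem.Dict.contains, List.any_filter] at *
  simp only [List.any_eq_false] at h ⊢
  intro p hp
  simp [h p hp]
theorem pvFilterD_contains_true {κ ν : Type} [BEq κ] [LawfulBEq κ] (P : κ → Bool) (d : PySem.Dict κ ν) (k : κ)
    (h : d.contains k = true) (hp : P k = true) : (pvFilterD P d).contains k = true := by
  simp only [pvFilterD, PySem.Dict.contains, List.any_filter] at *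
  simp only [List.any_eq_true] at h ⊢
  obtain ⟨p, hmem, hbeq⟩ := h
  exact ⟨p, hmem, by simp [eq_of_beq hbeq, hp]⟩

theorem pv_map_filter_pos {κ ν : Type} [BEq κ] [LawfulBEq κ] (P : κ → Bool) (k : κ) (v : ν)
    (hp : P k = true) (l : List (κ × ν)) :
    (l.map (fun p => if p.1 == k then (k, v) else p)).filter (fun p => P p.1)
      = (l.filter (fun p => P p.1)).map (fun p => if p.1 == k then (k, v) else p) := by
  induction l with
  | nil => rfl
  | cons p t ih =>
    by_cases h : p.1 == k
    · simp [eq_of_beq h, hp, ih]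
    · by_cases h2 : P p.1 = true <;> simp [h, h2, ih]
theorem pv_map_filter_neg {κ ν : Type} [BEq κ] [LawfulBEq κ] (P : κ → Bool) (k : κ) (v : ν)
    (hp : P k = false) (l : List (κ × ν)) :
    (l.map (fun p => if p.1 == k then (k, v) else p)).filter (fun p => P p.1)
      = l.filter (fun p => P p.1) := by
  induction l with
  | nil => rfl
  | cons p t ih =>
    by_cases h : p.1 == k
    · simp [eq_of_beq h, hp, ih]
    · by_cases h2 : P p.1 = true <;> simp [h, h2, ih]
theorem pvFilterD_insert {κ ν : Type} [BEq κ] [LawfulBEq κ] (P : κ → Bool) (d : PySem.Dict κ ν) (k : κ) (v : ν) :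
    pvFilterD P (d.insert k v) = if P k then (pvFilterD P d).insert k v else pvFilterD P d := by
  by_cases hc : d.contains k = true
  · by_cases hp : P k = true
    · rw [if_pos hp]
      have hc' := pvFilterD_contains_true P d k hc hp
      simp only [PySem.Dict.insert, hc, hc', if_pos]
      exact congrArg PySem.Dict.mk (pv_map_filter_pos P k v hp d.items)
    · rw [if_neg hp]
      simp only [PySem.Dict.insert, hc, if_pos]
      exact congrArg PySem.Dict.mk (pv_map_filter_neg P k v (by simpa using hp) d.items)
  · have hcf : d.contains k = false := by simpa using hc
    have hc' := pvFilterD_contains_false P d k hcf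
    simp only [PySem.Dict.insert, hcf, hc', Bool.false_eq_true, if_false]
    by_cases hp : P k = true
    · rw [if_pos hp]
      exact congrArg PySem.Dict.mk (by simp [List.filter_append, hp, pvFilterD])
    · rw [if_neg hp]
      exact congrArg PySem.Dict.mk (by simp [List.filter_append, show P k = false from by simpa using hp])

theorem pvFoldl_erase_items {κ ν : Type} [BEq κ] (ks : List κ) :
    ∀ d : PySem.Dict κ ν, (ks.foldl (fun acc k => acc.erase k) d).items
      = d.items.filter (fun p => !(ks.contains p.1)) := by
  induction ks with
  | nil => intro d; simp
  | cons k t ih =>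
    intro d
    rw [List.foldl_cons, ih (d.erase k)]
    simp only [PySem.Dict.erase, List.filter_filter]
    apply List.filter_congr
    intro p _
    simp [List.contains_cons, Bool.not_or, Bool.and_comm]

theorem pv_mem_byShift (covers : List (Int × Int × Int)) (j t : Int) :
    t ∈ (pvByShift covers).getD j [] ↔ ∃ p ∈ covers, p.1 = j ∧ p.2.1 = t := by
  have h : pvByShift covers
      = (covers.map (fun p => (p.1, p.2.1))).foldl (fun dct q => dct.modify q.1 [] (fun l => l ++ [q.2])) PySem.Dict.empty :=
    by unfold pvByShift; exact (List.foldl_map (f := fun (p : Int × Int × Int) => ((p.1, p.2.1) : Int × Int)) (g := fun (dct : PySem.Dict Int (List Int)) (q : Int × Int) => dct.modify q.1 [] (fun l => l ++ [q.2]))).symm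
  rw [h, PySem.Dict.getD_foldl_modify_append]
  simp only [PySem.Dict.getD_empty, List.nil_append, List.mem_map, List.mem_filter,
    List.mem_map, beq_iff_eq]
  constructor
  · rintro ⟨q, ⟨⟨p, hp, rfl⟩, hq1⟩, hq2⟩
    exact ⟨p, hp, hq1, hq2⟩
  · rintro ⟨p, hp, h1, h2⟩
    exact ⟨(p.1, p.2.1), ⟨⟨p, hp, rfl⟩, h1⟩, h2⟩

theorem pv_mem_byT (covers : List (Int × Int × Int)) (t j : Int) :
    j ∈ (pvByT covers).getD t [] ↔ ∃ p ∈ covers, p.2.1 = t ∧ p.1 = j := by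
  have h : pvByT covers
      = (covers.map (fun p => (p.2.1, p.1))).foldl (fun dct q => dct.modify q.1 [] (fun l => l ++ [q.2])) PySem.Dict.empty :=
    by unfold pvByT; exact (List.foldl_map (f := fun (p : Int × Int × Int) => ((p.2.1, p.1) : Int × Int)) (g := fun (dct : PySem.Dict Int (List Int)) (q : Int × Int) => dct.modify q.1 [] (fun l => l ++ [q.2]))).symm
  rw [h, PySem.Dict.getD_foldl_modify_append]
  simp only [PySem.Dict.getD_empty, List.nil_append, List.mem_map, List.mem_filter,
    List.mem_map, beq_iff_eq]
  constructor
  · rintro ⟨q, ⟨⟨p, hp, rfl⟩, hq1⟩, hq2⟩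
    exact ⟨p, hp, hq1, hq2⟩
  · rintro ⟨p, hp, h1, h2⟩
    exact ⟨(p.2.1, p.1), ⟨⟨p, hp, rfl⟩, h1⟩, h2⟩

theorem pv_pred_eq (covers blocked : List (Int × Int × Int)) (i j d : Int) :
    pvCheckOk blocked i d ((pvByShift covers).getD j [])
      = !((blocked.flatMap (fun q => ((pvByT covers).getD q.2.2 []).map (fun j' => (q.1, j', q.2.1)))).contains (i, j, d)) := by
  have hA : pvCheckOk blocked i d ((pvByShift covers).getD j []) = true
      ↔ ∀ p ∈ covers, p.1 = j → (i, d, p.2.1) ∉ blocked := by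
    simp only [pvCheckOk, List.all_eq_true, Bool.not_eq_eq_eq_not, Bool.not_true,
      List.contains_iff_mem, ← Bool.not_eq_true]
    constructor
    · intro h p hp h1
      have := h p.2.1 ((pv_mem_byShift covers j p.2.1).mpr ⟨p, hp, h1, rfl⟩)
      simpa [List.contains_iff_mem] using this
    · intro h t ht
      obtain ⟨p, hp, h1, h2⟩ := (pv_mem_byShift covers j t).mp ht
      subst h2
      simpa [List.contains_iff_mem] using h p hp h1
  have hB : ((blocked.flatMap (fun q => ((pvByT covers).getD q.2.2 []).map (fun j' => (q.1, j', q.2.1)))).contains (i, j, d)) = true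
      ↔ ∃ p ∈ covers, p.1 = j ∧ (i, d, p.2.1) ∈ blocked := by
    simp only [List.contains_iff_mem, List.mem_flatMap, List.mem_map]
    constructor
    · rintro ⟨q, hq, j', hj', heq⟩
      obtain ⟨p, hp, h1, h2⟩ := (pv_mem_byT covers q.2.2 j').mp hj'
      simp only [Prod.mk.injEq] at heq
      obtain ⟨e1, e2, e3⟩ := heq
      refine ⟨p, hp, h2.trans e2, ?_⟩
      have hq' : q = (i, d, q.2.2) := by rw [← e1, ← e3]
      rw [h1, ← hq']
      exact hq
    · rintro ⟨p, hp, h1, hb⟩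
      refine ⟨(i, d, p.2.1), hb, j, ?_, rfl⟩
      exact (pv_mem_byT covers p.2.1 j).mpr ⟨p, hp, rfl, h1⟩
  cases hC : ((blocked.flatMap (fun q => ((pvByT covers).getD q.2.2 []).map (fun j' => (q.1, j', q.2.1)))).contains (i, j, d)) with
  | false =>
    simp only [Bool.not_false]
    rw [hA]
    intro p hp h1 hb
    have := hB.mpr ⟨p, hp, h1, hb⟩
    rw [hC] at this
    exact absurd this (by decide)
  | true =>
    simp only [Bool.not_true]
    obtain ⟨p, hp, h1, hb⟩ := hB.mp hC
    rw [Bool.eq_false_iff]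
    intro hok
    exact hA.mp hok p hp h1 hb

-- A's per-shift body preserves the pvFilterD relation towards the insert-all loop
theorem pv_mid (covers blocked : List (Int × Int × Int)) (days : List Int) (shifts : List Int)
    (i : Int) (e : PySem.Dict (Int × Int × Int) Int) :
    shifts.foldl (fun acc j =>
        let ts := (pvByShift covers).getD j []
        if ts.isEmpty then
          days.foldl (fun acc d => acc.insert (i, j, d) 1) acc
        else
          days.foldl (fun acc d =>
            if pvCheckOk blocked i d ts then acc.insert (i, j, d) 1 else acc) acc)
      (pvFilterD (pvPred covers blocked) e)
    = pvFilterD (pvPred covers blocked)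
        (shifts.foldl (fun acc j => days.foldl (fun acc d => acc.insert (i, j, d) 1) acc) e) := by
  refine pvFoldl_rel (pvPred covers blocked) _ _ ?_ shifts e
  intro e j
  by_cases hts : ((pvByShift covers).getD j []).isEmpty
  · simp only [hts, if_true]
    refine pvFoldl_rel (pvPred covers blocked) _ _ ?_ days e
    intro e' d
    have hp : pvPred covers blocked (i, j, d) = true := by
      unfold pvPred pvCheckOk
      simp [List.isEmpty_iff.mp hts]
    rw [pvFilterD_insert, hp, if_pos rfl]
  · simp only [hts]
    refine pvFoldl_rel (pvPred covers blocked) _ _ ?_ days e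
    intro e' d
    rw [pvFilterD_insert]
    rfl

-- the whole availability dict A builds is the P-filtered all-available dict
theorem pv_portA (shifts : List Int) (covers : List (Int × Int × Int)) (employees : List Int)
    (days : List Int) (blocked : List (Int × Int × Int)) :
    employees.foldl (fun acc i =>
      shifts.foldl (fun acc j =>
        let ts := (pvByShift covers).getD j []
        if ts.isEmpty then
          days.foldl (fun acc d => acc.insert (i, j, d) 1) acc
        else
          days.foldl (fun acc d =>
            if pvCheckOk blocked i d ts then acc.insert (i, j, d) 1 else acc) acc) acc)
      PySem.Dict.empty
    = pvFilterD (pvPred covers blocked) (pvAllAvail shifts employees days) := by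
  unfold pvAllAvail
  conv_lhs => rw [show (PySem.Dict.empty : PySem.Dict (Int × Int × Int) Int)
    = pvFilterD (pvPred covers blocked) PySem.Dict.empty from rfl]
  refine pvFoldl_rel (pvPred covers blocked) _ _ ?_ employees PySem.Dict.empty
  intro e i
  exact pv_mid covers blocked days shifts i e

-- the erase loop of B, flattened to one erase per invalidated key
theorem pv_portB (shifts : List Int) (covers : List (Int × Int × Int)) (employees : List Int)
    (days : List Int) (blocked : List (Int × Int × Int)) :
    (blocked.foldl (fun acc q =>
        ((pvByT covers).getD q.2.2 []).foldl (fun acc j => acc.erase (q.1, j, q.2.1)) acc)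
      (pvAllAvail shifts employees days)).items
    = (pvAllAvail shifts employees days).items.filter
        (fun p => !((blocked.flatMap (fun q => ((pvByT covers).getD q.2.2 []).map (fun j' => (q.1, j', q.2.1)))).contains p.1)) := by
  have h1 : blocked.foldl (fun acc q =>
        ((pvByT covers).getD q.2.2 []).foldl (fun acc j => acc.erase (q.1, j, q.2.1)) acc)
      (pvAllAvail shifts employees days)
      = blocked.foldl (fun acc q =>
        (((pvByT covers).getD q.2.2 []).map (fun j' => (q.1, j', q.2.1))).foldl (fun acc k => acc.erase k) acc)
      (pvAllAvail shifts employees days) := by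
    apply PySem.List.foldl_congr_mem
    intro acc q _
    exact (List.foldl_map (f := fun (j' : Int) => ((q.1, j', q.2.1) : Int × Int × Int))
      (g := fun (acc : PySem.Dict (Int × Int × Int) Int) (k : Int × Int × Int) => acc.erase k)).symm
  rw [h1, ← pvFoldl_flatMap, pvFoldl_erase_items]


-- ===== dedup machinery: duplicate list entries only re-insert an existing key =====

def pvOnes {κ : Type} [BEq κ] (d : PySem.Dict κ Int) : Prop := ∀ p ∈ d.items, p.2 = 1

theorem pvOnes_empty {κ : Type} [BEq κ] : pvOnes (PySem.Dict.empty : PySem.Dict κ Int) := by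
  intro p hp
  simp [PySem.Dict.empty] at hp

theorem pvOnes_insert {κ : Type} [BEq κ] [LawfulBEq κ] (d : PySem.Dict κ Int) (k : κ)
    (h : pvOnes d) : pvOnes (d.insert k 1) := by
  intro p hp
  simp only [PySem.Dict.insert] at hp
  by_cases hc : d.contains k = true
  · rw [if_pos hc] at hp
    obtain ⟨q, hq, hfq⟩ := List.mem_map.mp hp
    by_cases hb : q.1 == k
    · rw [if_pos hb] at hfq; rw [← hfq]
    · rw [if_neg hb] at hfq; rw [← hfq]; exact h q hq
  · rw [if_neg hc] at hp
    rcases List.mem_append.mp hp with h1 | h1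
    · exact h p h1
    · rw [List.mem_singleton.mp h1]

theorem pvInsert_absorb {κ : Type} [BEq κ] [LawfulBEq κ] (d : PySem.Dict κ Int) (k : κ)
    (h : pvOnes d) (hc : d.contains k = true) : d.insert k 1 = d := by
  simp only [PySem.Dict.insert, hc, if_pos]
  apply PySem.Dict.ext
  show d.items.map (fun p => if p.1 == k then (k, 1) else p) = d.items
  have : ∀ p ∈ d.items, (fun p => if p.1 == k then ((k, 1) : κ × Int) else p) p = id p := by
    intro p hp
    by_cases hb : p.1 == k
    · simp only [hb, if_pos, id]
      have : p = (p.1, p.2) := rfl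
      rw [this, eq_of_beq hb, h p hp]
    · simp [hb]
  rw [List.map_congr_left this, List.map_id]

-- generic key-indexed insert loop: the four transfer properties
theorem pvGf_ones {κ δ : Type} [BEq κ] [LawfulBEq κ] (key : δ → κ) :
    ∀ (l : List δ) (e : PySem.Dict κ Int), pvOnes e →
      pvOnes (l.foldl (fun a y => a.insert (key y) 1) e) := by
  intro l
  induction l with
  | nil => intro e h; exact h
  | cons y t ih => intro e h; exact ih _ (pvOnes_insert e (key y) h)

theorem pvGf_mono {κ δ : Type} [BEq κ] [LawfulBEq κ] (key : δ → κ) :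
    ∀ (l : List δ) (e : PySem.Dict κ Int) (k : κ), e.contains k = true →
      (l.foldl (fun a y => a.insert (key y) 1) e).contains k = true := by
  intro l
  induction l with
  | nil => intro e k h; exact h
  | cons y t ih =>
    intro e k h
    exact ih _ k (by rw [PySem.Dict.contains_insert]; simp [h])

theorem pvGf_self {κ δ : Type} [BEq κ] [LawfulBEq κ] (key : δ → κ) :
    ∀ (l : List δ) (e : PySem.Dict κ Int) (y0 : δ), y0 ∈ l →
      (l.foldl (fun a y => a.insert (key y) 1) e).contains (key y0) = true := by
  intro l
  induction l with
  | nil => intro e y0 h; cases h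
  | cons y t ih =>
    intro e y0 h
    rcases List.mem_cons.mp h with h1 | h1
    · subst h1
      exact pvGf_mono key t _ _ (PySem.Dict.contains_insert_self e (key y0) 1)
    · exact ih _ y0 h1

theorem pvGf_absorb {κ δ : Type} [BEq κ] [LawfulBEq κ] (key : δ → κ) :
    ∀ (l : List δ) (e : PySem.Dict κ Int), pvOnes e →
      (∀ y ∈ l, e.contains (key y) = true) →
      l.foldl (fun a y => a.insert (key y) 1) e = e := by
  intro l
  induction l with
  | nil => intro e _ _; rfl
  | cons y t ih =>
    intro e h1 h2
    have habs : e.insert (key y) 1 = e := pvInsert_absorb e (key y) h1 (h2 y (List.mem_cons_self))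
    simp only [List.foldl_cons, habs]
    exact ih e h1 (fun y0 hy0 => h2 y0 (List.mem_cons_of_mem y hy0))

-- employee-level step (two nested folds): the same four properties
theorem pvGe_ones (shifts days : List Int) (i : Int) :
    ∀ (e : PySem.Dict (Int × Int × Int) Int), pvOnes e →
      pvOnes (shifts.foldl (fun a j => days.foldl (fun a d => a.insert (i, j, d) 1) a) e) := by
  induction shifts with
  | nil => intro e h; exact h
  | cons j t ih => intro e h; exact ih _ (pvGf_ones (fun d => (i, j, d)) days e h)

theorem pvGe_mono (shifts days : List Int) (i : Int) :
    ∀ (e : PySem.Dict (Int × Int × Int) Int) (k : Int × Int × Int), e.contains k = true →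
      (shifts.foldl (fun a j => days.foldl (fun a d => a.insert (i, j, d) 1) a) e).contains k = true := by
  induction shifts with
  | nil => intro e k h; exact h
  | cons j t ih => intro e k h; exact ih _ k (pvGf_mono (fun d => (i, j, d)) days e k h)

theorem pvGe_self (shifts days : List Int) (i : Int) :
    ∀ (e : PySem.Dict (Int × Int × Int) Int) (j0 d0 : Int), j0 ∈ shifts → d0 ∈ days →
      (shifts.foldl (fun a j => days.foldl (fun a d => a.insert (i, j, d) 1) a) e).contains (i, j0, d0) = true := by
  induction shifts with
  | nil => intro e j0 d0 h _; cases h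
  | cons j t ih =>
    intro e j0 d0 hj hd
    rcases List.mem_cons.mp hj with h1 | h1
    · subst h1
      exact pvGe_mono t days i _ _ (pvGf_self (fun d => (i, j0, d)) days e d0 hd)
    · exact ih _ j0 d0 h1 hd

theorem pvGe_absorb (shifts days : List Int) (i : Int) :
    ∀ (e : PySem.Dict (Int × Int × Int) Int), pvOnes e →
      (∀ j ∈ shifts, ∀ d ∈ days, e.contains (i, j, d) = true) →
      shifts.foldl (fun a j => days.foldl (fun a d => a.insert (i, j, d) 1) a) e = e := by
  induction shifts with
  | nil => intro e _ _; rfl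
  | cons j t ih =>
    intro e h1 h2
    have habs : days.foldl (fun a d => a.insert (i, j, d) 1) e = e :=
      pvGf_absorb (fun d => (i, j, d)) days e h1 (fun d hd => h2 j List.mem_cons_self d hd)
    simp only [List.foldl_cons, habs]
    exact ih e h1 (fun j0 hj0 d hd => h2 j0 (List.mem_cons_of_mem j hj0) d hd)

-- the new (first-occurrence) elements Set.add appends when folded from seen-set s
def pvNews {γ : Type} [BEq γ] : List γ → List γ → List γ
  | _, [] => []
  | s, x :: t => if s.contains x then pvNews s t else x :: pvNews (s ++ [x]) t

theorem pvNews_eq {γ : Type} [BEq γ] :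
    ∀ (l s : List γ), l.foldl PySem.Set.add s = s ++ pvNews s l := by
  intro l
  induction l with
  | nil => intro s; simp [pvNews]
  | cons x t ih =>
    intro s
    by_cases h : s.contains x
    · simp [pvNews, h, PySem.Set.add, ih]
    · simp only [pvNews, h, if_false, List.foldl_cons, PySem.Set.add, Bool.false_eq_true]
      rw [if_neg (by simp [h]), ih (s ++ [x])]
      simp

theorem pvDedup_eq_news {γ : Type} [BEq γ] (l : List γ) :
    PySem.List.dedup l = pvNews [] l := by
  have h := pvNews_eq l []
  simpa [PySem.List.dedup, PySem.Set.ofList, PySem.Set.empty] using h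

-- folding G over l from a dict that already absorbed the keys of the seen elements s
-- visits only the first occurrences
theorem pvFoldl_dedup {γ : Type} [BEq γ] [LawfulBEq γ] {κ : Type} [BEq κ]
    (G : PySem.Dict κ Int → γ → PySem.Dict κ Int) (pvK : γ → κ → Prop)
    (hOnes : ∀ e x, pvOnes e → pvOnes (G e x))
    (hMono : ∀ e x k, e.contains k = true → (G e x).contains k = true)
    (hSelf : ∀ e x k, pvK x k → (G e x).contains k = true)
    (hAbsorb : ∀ e x, pvOnes e → (∀ k, pvK x k → e.contains k = true) → G e x = e) :
    ∀ (l s : List γ) (e : PySem.Dict κ Int), pvOnes e →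
      (∀ y ∈ s, ∀ k, pvK y k → e.contains k = true) →
      l.foldl G e = (pvNews s l).foldl G e := by
  intro l
  induction l with
  | nil => intro s e _ _; rfl
  | cons x t ih =>
    intro s e h1 h2
    by_cases hc : s.contains x
    · have hx : x ∈ s := by simpa [List.contains_iff_mem] using hc
      have habs : G e x = e := hAbsorb e x h1 (h2 x hx)
      simp only [pvNews, hc, if_true, List.foldl_cons, habs]
      exact ih s e h1 h2
    · simp only [pvNews, hc, Bool.false_eq_true, if_false, List.foldl_cons]
      refine ih (s ++ [x]) (G e x) (hOnes e x h1) ?_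
      intro y hy k hk
      rcases List.mem_append.mp hy with h3 | h3
      · exact hMono e x k (h2 y h3 k hk)
      · rw [List.mem_singleton.mp h3] at hk
        exact hSelf e x k hk

theorem pvFoldl_dedup' {γ : Type} [BEq γ] [LawfulBEq γ] {κ : Type} [BEq κ]
    (G : PySem.Dict κ Int → γ → PySem.Dict κ Int) (pvK : γ → κ → Prop)
    (hOnes : ∀ e x, pvOnes e → pvOnes (G e x))
    (hMono : ∀ e x k, e.contains k = true → (G e x).contains k = true)
    (hSelf : ∀ e x k, pvK x k → (G e x).contains k = true)
    (hAbsorb : ∀ e x, pvOnes e → (∀ k, pvK x k → e.contains k = true) → G e x = e)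
    (l : List γ) (e : PySem.Dict κ Int) (h1 : pvOnes e) :
    l.foldl G e = (PySem.List.dedup l).foldl G e := by
  rw [pvDedup_eq_news]
  exact pvFoldl_dedup G pvK hOnes hMono hSelf hAbsorb l [] e h1 (by simp)

theorem pvFoldl_congr_inv {κ γ : Type} [BEq κ] (Inv : PySem.Dict κ Int → Prop)
    (F G : PySem.Dict κ Int → γ → PySem.Dict κ Int)
    (hInv : ∀ e x, Inv e → Inv (F e x))
    (h : ∀ e x, Inv e → F e x = G e x) :
    ∀ (l : List γ) (e : PySem.Dict κ Int), Inv e → l.foldl F e = l.foldl G e := by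
  intro l
  induction l with
  | nil => intro e _; rfl
  | cons x t ih =>
    intro e he
    simp only [List.foldl_cons]
    rw [← h e x he]
    exact ih (F e x) (hInv e x he)

-- iterating the deduplicated lists builds the same dict
theorem pvAllAvail_dedup (shifts employees days : List Int) :
    pvAllAvail shifts employees days
      = pvAllAvail (PySem.List.dedup shifts) (PySem.List.dedup employees) (PySem.List.dedup days) := by
  unfold pvAllAvail
  calc employees.foldl (fun acc i => shifts.foldl (fun acc j => days.foldl (fun acc d => acc.insert (i, j, d) (1 : Int)) acc) acc) PySem.Dict.empty
      = (PySem.List.dedup employees).foldl (fun acc i => shifts.foldl (fun acc j => days.foldl (fun acc d => acc.insert (i, j, d) (1 : Int)) acc) acc) PySem.Dict.empty := by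
        refine pvFoldl_dedup' _ (fun i k => ∃ j ∈ shifts, ∃ d ∈ days, k = (i, j, d)) ?_ ?_ ?_ ?_ employees PySem.Dict.empty pvOnes_empty
        · intro e i h; exact pvGe_ones shifts days i e h
        · intro e i k h; exact pvGe_mono shifts days i e k h
        · rintro e i k ⟨j, hj, d, hd, rfl⟩; exact pvGe_self shifts days i e j d hj hd
        · intro e i h1 h2
          exact pvGe_absorb shifts days i e h1 (fun j hj d hd => h2 (i, j, d) ⟨j, hj, d, hd, rfl⟩)
    _ = (PySem.List.dedup employees).foldl (fun acc i => (PySem.List.dedup shifts).foldl (fun acc j => days.foldl (fun acc d => acc.insert (i, j, d) (1 : Int)) acc) acc) PySem.Dict.empty := by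
        refine pvFoldl_congr_inv pvOnes _ _ ?_ ?_ (PySem.List.dedup employees) PySem.Dict.empty pvOnes_empty
        · intro e i h; exact pvGe_ones shifts days i e h
        · intro e i h
          refine pvFoldl_dedup' _ (fun j k => ∃ d ∈ days, k = (i, j, d)) ?_ ?_ ?_ ?_ shifts e h
          · intro e' j h'; exact pvGf_ones (fun d => (i, j, d)) days e' h'
          · intro e' j k h'; exact pvGf_mono (fun d => (i, j, d)) days e' k h'
          · rintro e' j k ⟨d, hd, rfl⟩; exact pvGf_self (fun d => (i, j, d)) days e' d hd
          · intro e' j h1 h2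
            exact pvGf_absorb (fun d => (i, j, d)) days e' h1 (fun d hd => h2 (i, j, d) ⟨d, hd, rfl⟩)
    _ = (PySem.List.dedup employees).foldl (fun acc i => (PySem.List.dedup shifts).foldl (fun acc j => (PySem.List.dedup days).foldl (fun acc d => acc.insert (i, j, d) (1 : Int)) acc) acc) PySem.Dict.empty := by
        refine pvFoldl_congr_inv pvOnes _ _ ?_ ?_ (PySem.List.dedup employees) PySem.Dict.empty pvOnes_empty
        · intro e i h; exact pvGe_ones (PySem.List.dedup shifts) days i e h
        · intro e i h
          refine pvFoldl_congr_inv pvOnes _ _ ?_ ?_ (PySem.List.dedup shifts) e h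
          · intro e' j h'; exact pvGf_ones (fun d => (i, j, d)) days e' h'
          · intro e' j h'
            refine pvFoldl_dedup' _ (fun d k => k = (i, j, d)) ?_ ?_ ?_ ?_ days e' h'
            · intro e'' d h''; exact pvOnes_insert e'' (i, j, d) h''
            · intro e'' d k h''
              rw [PySem.Dict.contains_insert]; simp [h'']
            · rintro e'' d k rfl; exact PySem.Dict.contains_insert_self e'' (i, j, d) 1
            · rintro e'' d h1 h2
              exact pvInsert_absorb e'' (i, j, d) h1 (h2 (i, j, d) rfl)

theorem pv_main (shifts : List Int) (covers : List (Int × Int × Int)) (employees : List Int)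
    (days : List Int) (blocked : List (Int × Int × Int)) :
    derive_shift_availability_from_grid shifts covers employees days blocked
      = derive_shift_availability_from_grid_alt shifts covers employees days blocked := by
  unfold derive_shift_availability_from_grid derive_shift_availability_from_grid_alt
  rw [pv_portA, pv_portB, ← pvAllAvail_dedup]
  show ((pvAllAvail shifts employees days).items.filter (fun p => pvPred covers blocked p.1)).map _
    = _
  congr 1
  apply List.filter_congr
  intro p _
  exact pv_pred_eq covers blocked p.1.1 p.1.2.1 p.1.2.2

-- ===== VERDICT (by name: the statement is the Claim_ definition above) =====
theorem derive_shift_availability_from_grid_spec : Claim_equal_derive_shift_availability_from_grid := by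
  intro shifts covers employees days blocked _
  exact pv_main shifts covers employees days blocked
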